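-- pv_equiv track=rewrite | github.com/OpCode41/IoTCrusher | IoTCrusherOpenSource.py | create_passwords_only
-- ===== SOURCE A (Python) =====
-- def create_passwords_only(user_pass_combos):
-- #-----------------------------------------------------------
--
--     passwords_only = []
--     for username in user_pass_combos:
--         for pwd in user_pass_combos[username]:
--             if not pwd in passwords_only:
--                 passwords_only.append(pwd)
--
--     passwords_only.sort()
--
--     return passwords_only
-- ===== SOURCE B (Python) =====
-- def create_passwords_only(user_pass_combos):
--     # sort everything first, then drop adjacent duplicates in one linear pass
--     all_pw = sorted(p for pwds in user_pass_combos.values() for p in pwds)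
--     result = []
--     for pwd in all_pw:
--         if not result or result[-1] != pwd:
--             result.append(pwd)
--     return result
-- ===== Notes on version B (the rewrite author's own statement) =====
-- stated objective: faster
-- what changed: A dedupes during collection with a linear membership scan of the accumulator for every password and sorts afterwards; B collects all passwords with duplicates, sorts the full list, and removes adjacent duplicates in one linear pass.
import Mathlib
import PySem

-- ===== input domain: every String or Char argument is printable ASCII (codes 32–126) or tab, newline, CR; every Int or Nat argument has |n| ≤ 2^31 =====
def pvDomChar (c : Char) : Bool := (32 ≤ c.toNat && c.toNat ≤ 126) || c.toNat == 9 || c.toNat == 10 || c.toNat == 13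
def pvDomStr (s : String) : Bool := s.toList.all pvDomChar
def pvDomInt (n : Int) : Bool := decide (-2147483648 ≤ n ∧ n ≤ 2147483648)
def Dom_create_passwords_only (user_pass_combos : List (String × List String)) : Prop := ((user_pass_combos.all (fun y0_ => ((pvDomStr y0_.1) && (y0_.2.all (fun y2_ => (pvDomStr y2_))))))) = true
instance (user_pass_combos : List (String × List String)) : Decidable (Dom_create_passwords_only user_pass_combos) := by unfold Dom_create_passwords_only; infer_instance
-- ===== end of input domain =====

-- B sorts the full multiset of passwords first and removes adjacent duplicates in one
-- linear pass, instead of A's membership scan of the accumulator at every insertion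
-- (objective: alternative decomposition of "unique passwords, sorted").


-- ===== PORT A =====
-- A: for each username (dict iteration = the pairs in order), append each of its
-- passwords to the accumulator unless already present; finally .sort() (no key).
def create_passwords_only (user_pass_combos : List (String × List String)) : List String :=
  let passwords_only :=
    user_pass_combos.foldl
      (fun acc p => p.2.foldl (fun acc pwd => if pwd ∈ acc then acc else acc ++ [pwd]) acc) []
  PySem.List.sorted passwords_only (fun x => x) false

-- ===== PORT B =====
-- B: sort ALL passwords (values flattened, duplicates kept), then one pass that
-- appends an element only when it differs from the last appended one.
def create_passwords_only_alt (user_pass_combos : List (String × List String)) : List String :=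
  let all_pw := PySem.List.sorted ((user_pass_combos.map Prod.snd).flatten) (fun x => x) false
  all_pw.foldl (fun res pwd => if res.getLast? = some pwd then res else res ++ [pwd]) []

-- ===== PRECONDITION & SPEC =====
def Spec_create_passwords_only (user_pass_combos : List (String × List String)) (out : List String) : Prop := out = create_passwords_only_alt user_pass_combos
instance (user_pass_combos : List (String × List String)) (out : List String) : Decidable (Spec_create_passwords_only user_pass_combos out) := by unfold Spec_create_passwords_only; infer_instance

-- ===== CLAIM (what is proved, stated in full; the proofs are below) =====
def Claim_equal_create_passwords_only : Prop := ∀ (user_pass_combos : List (String × List String)), Dom_create_passwords_only user_pass_combos → Spec_create_passwords_only user_pass_combos (create_passwords_only user_pass_combos)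

-- ===== LEMMAS AND PROOFS =====

-- A's collection loop: the "append if not member" fold (ordered dedup).
def pvNub (acc : List String) (xs : List String) : List String :=
  xs.foldl (fun acc pwd => if pwd ∈ acc then acc else acc ++ [pwd]) acc

-- B's second loop: adjacent dedup.
def pvAdj (acc : List String) (xs : List String) : List String :=
  xs.foldl (fun res pwd => if res.getLast? = some pwd then res else res ++ [pwd]) acc

lemma mem_pvNub (xs : List String) : ∀ (acc : List String) (a : String),
    a ∈ pvNub acc xs ↔ a ∈ acc ∨ a ∈ xs := by
  induction xs with
  | nil => simp [pvNub]
  | cons x t ih =>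
    intro acc a
    simp only [pvNub, List.foldl_cons]
    by_cases hx : x ∈ acc
    · simp only [if_pos hx]
      rw [show (t.foldl (fun acc pwd => if pwd ∈ acc then acc else acc ++ [pwd]) acc) = pvNub acc t from rfl,
        ih]
      constructor
      · rintro (h | h) <;> simp_all
      · rintro (h | h)
        · exact Or.inl h
        · rcases List.mem_cons.mp h with h | h
          · exact Or.inl (h ▸ hx)
          · exact Or.inr h
    · simp only [if_neg hx]
      rw [show (t.foldl (fun acc pwd => if pwd ∈ acc then acc else acc ++ [pwd]) (acc ++ [x])) = pvNub (acc ++ [x]) t from rfl,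
        ih]
      simp [List.mem_append, List.mem_cons, or_assoc]

lemma nodup_pvNub (xs : List String) : ∀ (acc : List String),
    acc.Nodup → (pvNub acc xs).Nodup := by
  induction xs with
  | nil => simp [pvNub]
  | cons x t ih =>
    intro acc hacc
    simp only [pvNub, List.foldl_cons]
    by_cases hx : x ∈ acc
    · simpa [if_pos hx] using ih acc hacc
    · refine if_neg hx ▸ ih (acc ++ [x]) ?_
      rw [List.nodup_append]
      exact ⟨hacc, by simp, by intro a ha b hb; rw [List.mem_singleton] at hb; subst hb; exact fun h => hx (h ▸ ha)⟩

lemma mem_pvAdj (xs : List String) : ∀ (acc : List String) (a : String),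
    a ∈ pvAdj acc xs ↔ a ∈ acc ∨ a ∈ xs := by
  induction xs with
  | nil => simp [pvAdj]
  | cons x t ih =>
    intro acc a
    simp only [pvAdj, List.foldl_cons]
    by_cases hx : acc.getLast? = some x
    · simp only [if_pos hx]
      rw [show (t.foldl (fun res pwd => if res.getLast? = some pwd then res else res ++ [pwd]) acc) = pvAdj acc t from rfl,
        ih]
      have hmem : x ∈ acc := List.mem_of_getLast? hx
      constructor
      · rintro (h | h) <;> simp_all
      · rintro (h | h)
        · exact Or.inl h
        · rcases List.mem_cons.mp h with h | h
          · exact Or.inl (h ▸ hmem)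
          · exact Or.inr h
    · simp only [if_neg hx]
      rw [show (t.foldl (fun res pwd => if res.getLast? = some pwd then res else res ++ [pwd]) (acc ++ [x])) = pvAdj (acc ++ [x]) t from rfl,
        ih]
      simp [List.mem_append, List.mem_cons, or_assoc]

lemma pairwise_lt_pvAdj (xs : List String) : ∀ (acc : List String),
    xs.Pairwise (· ≤ ·) → acc.Pairwise (· < ·) →
    (∀ a ∈ acc, ∀ s ∈ xs, a ≤ s) → (pvAdj acc xs).Pairwise (· < ·) := by
  induction xs with
  | nil => intro acc _ hacc _; simpa [pvAdj] using hacc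
  | cons x t ih =>
    intro acc hsort hacc hle
    have hsx : ∀ s ∈ t, x ≤ s := (List.pairwise_cons.mp hsort).1
    have hst : t.Pairwise (· ≤ ·) := (List.pairwise_cons.mp hsort).2
    simp only [pvAdj, List.foldl_cons]
    by_cases hx : acc.getLast? = some x
    · rw [if_pos hx]
      refine ih acc hst hacc ?_
      intro a ha s hs
      exact hle a ha s (List.mem_cons_of_mem _ hs)
    · rw [if_neg hx]
      refine ih (acc ++ [x]) hst ?_ ?_
      · rw [List.pairwise_append]
        refine ⟨hacc, by simp, ?_⟩
        intro a ha b hb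
        rw [List.mem_singleton] at hb
        subst hb
        have hax : a ≤ b := hle a ha b (List.mem_cons_self)
        rcases lt_or_eq_of_le hax with h | h
        · exact h
        · exfalso
          subst h
          rcases List.eq_nil_or_concat acc with rfl | ⟨ys, z, rfl⟩
          · simp at ha
          · rw [List.concat_eq_append] at ha hacc hle hx
            have hz : (ys ++ [z]).getLast? = some z := by simp
            rcases List.mem_append.mp ha with h' | h'
            · have hlt : a < z := by
                rw [List.pairwise_append] at hacc
                exact hacc.2.2 a h' z (List.mem_singleton.mpr rfl)
              have hzx : z ≤ a := hle z (by simp) a List.mem_cons_self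
              exact absurd hzx (not_le_of_gt hlt)
            · rw [List.mem_singleton] at h'
              exact hx (h' ▸ hz)
      · intro a ha s hs
        rcases List.mem_append.mp ha with h' | h'
        · exact hle a h' s (List.mem_cons_of_mem _ hs)
        · rw [List.mem_singleton] at h'
          exact h' ▸ hsx s hs

theorem create_passwords_only_spec : Claim_equal_create_passwords_only := by
  intro l _
  unfold Spec_create_passwords_only create_passwords_only create_passwords_only_alt
  -- name the flattened multiset of passwords
  set xs := (l.map Prod.snd).flatten with hxs
  -- A's collection fold over pairs is pvNub over the flattened list
  have hA : l.foldl (fun acc p => p.2.foldl (fun acc pwd => if pwd ∈ acc then acc else acc ++ [pwd]) acc) []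
      = pvNub [] xs := by
    rw [hxs, ← List.flatMap_def, pvNub, List.foldl_flatMap]
  rw [hA]
  -- B's two passes
  have hB : ((PySem.List.sorted xs (fun x => x) false).foldl
      (fun res pwd => if res.getLast? = some pwd then res else res ++ [pwd]) [])
      = pvAdj [] (PySem.List.sorted xs (fun x => x) false) := rfl
  rw [hB]
  -- the right-hand side is strictly increasing and a permutation of pvNub [] xs
  set S := PySem.List.sorted xs (fun x => x) false with hS
  have hSsort : S.Pairwise (· ≤ ·) :=
    PySem.List.sorted_pairwise (xs := xs) (key := fun x => x)
  have hD : (pvAdj [] S).Pairwise (· < ·) :=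
    pairwise_lt_pvAdj S [] hSsort (by simp) (by simp)
  have hDnodup : (pvAdj [] S).Nodup := hD.imp ne_of_lt
  have hNnodup : (pvNub [] xs).Nodup := nodup_pvNub xs [] (by simp)
  have hfin : (pvAdj [] S).toFinset = (pvNub [] xs).toFinset := by
    ext a
    simp only [List.mem_toFinset, mem_pvAdj, mem_pvNub, List.not_mem_nil, false_or]
    rw [hS, PySem.List.mem_sorted]
  have hperm : (pvAdj [] S).Perm (pvNub [] xs) :=
    List.perm_of_nodup_nodup_toFinset_eq hDnodup hNnodup hfin
  exact PySem.List.sorted_eq_of_perm_of_pairwise_lt _ _ (fun x => x) hperm hD
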